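-- pv_equiv track=rewrite | github.com/jhanley634/changepoint | ch2_adjustable_detector/view_all_det.py | _get_bkpt_results
-- ===== SOURCE A (Python) =====
-- def _get_bkpt_results(n, bkpts, k=20):
--     for i in range(n):
--         if i - 1 in bkpts:
--             yield -k
--         elif i in bkpts:
--             yield k
--         else:
--             yield 0
-- ===== SOURCE B (Python) =====
-- def _get_bkpt_results(n, bkpts, k=20):
--     result = [0] * n if n > 0 else []
--     for b in bkpts:
--         if 0 <= b < n:
--             result[b] = k
--     for b in bkpts:
--         if 0 <= b + 1 < n:
--             result[b + 1] = -k
--     yield from result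
-- ===== Notes on version B (the rewrite author's own statement) =====
-- stated objective: alternative
-- what changed: Replaces A's per-index membership scans over bkpts with a preallocated zero table and two scatter passes over bkpts (k first, then -k so the -k pass wins at indices that are both a breakpoint and preceded by one).
import Mathlib
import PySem

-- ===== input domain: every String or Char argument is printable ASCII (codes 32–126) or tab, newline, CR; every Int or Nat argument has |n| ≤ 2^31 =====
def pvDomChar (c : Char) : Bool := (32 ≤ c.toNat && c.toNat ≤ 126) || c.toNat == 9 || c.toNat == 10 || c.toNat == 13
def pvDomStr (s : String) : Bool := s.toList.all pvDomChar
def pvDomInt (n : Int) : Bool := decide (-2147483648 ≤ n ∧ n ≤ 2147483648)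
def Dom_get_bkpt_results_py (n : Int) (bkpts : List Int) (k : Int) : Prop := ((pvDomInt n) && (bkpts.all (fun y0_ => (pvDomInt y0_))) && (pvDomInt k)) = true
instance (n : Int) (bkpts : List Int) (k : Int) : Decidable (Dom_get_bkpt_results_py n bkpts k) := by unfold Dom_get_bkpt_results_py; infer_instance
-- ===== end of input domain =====

-- B replaces A's per-index membership scan of bkpts with one zero table and two
-- scatter passes over bkpts (k first, then -k so -k wins): a different decomposition.

-- ===== PORT A =====
-- generator: yields collected into a list in order
def get_bkpt_results_py (n : Int) (bkpts : List Int) (k : Int) : List Int :=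
  (PySem.List.pyRange 0 n 1).foldl (fun acc i =>
    if (i - 1) ∈ bkpts then acc ++ [-k]
    else if i ∈ bkpts then acc ++ [k]
    else acc ++ [0]) []

-- ===== PORT B =====
def get_bkpt_results_py_alt (n : Int) (bkpts : List Int) (k : Int) : List Int :=
  let result := if 0 < n then List.replicate n.toNat 0 else []      -- [0] * n if n > 0 else []
  let result := bkpts.foldl (fun acc b =>
    if 0 ≤ b ∧ b < n then acc.set b.toNat k else acc) result        -- result[b] = k
  bkpts.foldl (fun acc b =>
    if 0 ≤ b + 1 ∧ b + 1 < n then acc.set (b + 1).toNat (-k) else acc) result  -- result[b+1] = -k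

-- ===== PRECONDITION & SPEC =====
def Spec_get_bkpt_results_py (n : Int) (bkpts : List Int) (k : Int) (out : List Int) : Prop := out = get_bkpt_results_py_alt n bkpts k
instance (n : Int) (bkpts : List Int) (k : Int) (out : List Int) : Decidable (Spec_get_bkpt_results_py n bkpts k out) := by unfold Spec_get_bkpt_results_py; infer_instance

-- ===== CLAIM (what is proved, stated in full; the proofs are below) =====
def Claim_equal_get_bkpt_results_py : Prop := ∀ (n : Int) (bkpts : List Int) (k : Int), Dom_get_bkpt_results_py n bkpts k → Spec_get_bkpt_results_py n bkpts k (get_bkpt_results_py n bkpts k)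

-- ===== LEMMAS AND PROOFS =====

-- a scatter pass preserves the list length
theorem pvScatterLength (g : Int → Int) (n v : Int) (bs : List Int) (xs : List Int) :
    (bs.foldl (fun acc b => if 0 ≤ g b ∧ g b < n then acc.set (g b).toNat v else acc) xs).length
      = xs.length := by
  induction bs generalizing xs with
  | nil => rfl
  | cons b bs ih =>
    simp only [List.foldl_cons]
    rw [ih]
    split <;> simp

-- value at an in-range index after a scatter pass: v if some b hits it, else unchanged
theorem pvScatterGet (g : Int → Int) (n v : Int) (bs : List Int) (xs : List Int)
    (hlen : xs.length = n.toNat) (j : Nat) (hj : j < xs.length) :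
    (bs.foldl (fun acc b => if 0 ≤ g b ∧ g b < n then acc.set (g b).toNat v else acc) xs)[j]?
      = if (j : Int) ∈ bs.map g then some v else xs[j]? := by
  induction bs generalizing xs with
  | nil => simp
  | cons b bs ih =>
    simp only [List.foldl_cons]
    have hlen' : (if 0 ≤ g b ∧ g b < n then xs.set (g b).toNat v else xs).length = n.toNat := by
      split <;> simp [hlen]
    have hj' : j < (if 0 ≤ g b ∧ g b < n then xs.set (g b).toNat v else xs).length := by
      rw [hlen']; omega
    rw [ih _ hlen' hj']
    by_cases hmem : (j : Int) ∈ bs.map g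
    · simp [hmem]
    · simp only [hmem, if_false, List.map_cons, List.mem_cons]
      by_cases heq : (j : Int) = g b
      · have hg0 : 0 ≤ g b := by omega
        have hgn : g b < n := by
          have : (j : Int) < n := by
            have := hj; rw [hlen] at this; omega
          omega
        have htn : (g b).toNat = j := by omega
        simp [heq, hg0, hgn, htn, hj]
      · simp only [heq]
        split
        · rename_i hguard
          have hne : (g b).toNat ≠ j := by omega
          rw [List.getElem?_set_ne hne]
          simp
        · simp

theorem pvAltGet (n : Int) (bkpts : List Int) (k : Int) (j : Nat) (hj : j < n.toNat) :
    (get_bkpt_results_py_alt n bkpts k)[j]?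
      = some (if ((j : Int) - 1) ∈ bkpts then -k
              else if (j : Int) ∈ bkpts then k else 0) := by
  unfold get_bkpt_results_py_alt
  have hn : 0 < n := by omega
  simp only [hn, if_pos]
  have hlen0 : (List.replicate n.toNat (0 : Int)).length = n.toNat := by simp
  have hlen1 : (bkpts.foldl (fun acc b => if 0 ≤ b ∧ b < n then acc.set b.toNat k else acc)
      (List.replicate n.toNat (0 : Int))).length = n.toNat := by
    rw [pvScatterLength (g := fun b => b)]; simp
  rw [pvScatterGet (g := fun b => b + 1) n (-k) bkpts _ hlen1 j (by omega)]
  rw [pvScatterGet (g := fun b => b) n k bkpts _ hlen0 j (by omega)]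
  have h1 : ((j : Int) ∈ bkpts.map (fun b => b + 1)) ↔ ((j : Int) - 1) ∈ bkpts := by
    simp only [List.mem_map]
    constructor
    · rintro ⟨b, hb, hbe⟩
      have hb' : (j : Int) - 1 = b := by omega
      rw [hb']; exact hb
    · intro h; exact ⟨(j : Int) - 1, h, by ring⟩
  have h2 : ((j : Int) ∈ bkpts.map (fun b => b)) ↔ (j : Int) ∈ bkpts := by simp
  rw [if_congr h1 rfl rfl, if_congr h2 rfl rfl]
  split
  · rfl
  · split
    · rfl
    · simp [hj]

theorem pvAGet (n : Int) (bkpts : List Int) (k : Int) :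
    get_bkpt_results_py n bkpts k
      = (PySem.List.pyRange 0 n 1).map (fun i =>
          if (i - 1) ∈ bkpts then -k else if i ∈ bkpts then k else 0) := by
  unfold get_bkpt_results_py
  have : (fun (acc : List Int) (i : Int) =>
      if (i - 1) ∈ bkpts then acc ++ [-k]
      else if i ∈ bkpts then acc ++ [k]
      else acc ++ [0])
    = (fun (acc : List Int) (i : Int) =>
        acc ++ [if (i - 1) ∈ bkpts then -k else if i ∈ bkpts then k else 0]) := by
    funext acc i; split_ifs <;> rfl
  rw [this, PySem.List.foldl_append_singleton_eq_map]
  simp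

-- ===== VERDICT (by name: the statement is the Claim_ definition above) =====
theorem get_bkpt_results_py_spec : Claim_equal_get_bkpt_results_py := by
  intro n bkpts k _
  unfold Spec_get_bkpt_results_py
  apply List.ext_getElem?
  intro j
  have hlenA : (get_bkpt_results_py n bkpts k).length = n.toNat := by
    rw [pvAGet]; simp [PySem.List.length_pyRange_one]
  have hlenB : (get_bkpt_results_py_alt n bkpts k).length = n.toNat := by
    unfold get_bkpt_results_py_alt
    rw [pvScatterLength (g := fun b => b + 1), pvScatterLength (g := fun b => b)]
    split
    · simp
    · simp; omega
  by_cases hj : j < n.toNat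
  · rw [pvAltGet n bkpts k j hj, pvAGet]
    rw [List.getElem?_map, PySem.List.getElem?_pyRange_one]
    have hj2 : (j : Int) < n := by omega
    simp [hj2]
  · rw [List.getElem?_eq_none (by omega), List.getElem?_eq_none (by omega)]
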